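-- pv_equiv track=rewrite | github.com/saikatpatra-23/approach-note-generator | app.py | _summary_from_message
-- ===== SOURCE A (Python) =====
-- def _summary_from_message(message: str) -> str:
--     parts = [part.strip() for part in message.split("\n") if part.strip()]
--     if not parts:
--         return ""
--     summary_lines = []
--     for part in parts:
--         summary_lines.append(part)
--         if part.endswith("?"):
--             break
--         if len(summary_lines) >= 3:
--             break
--     return " ".join(summary_lines).replace("?", ".").strip()
-- ===== SOURCE B (Python) =====
-- def _summary_from_message(message: str) -> str:
--     def go(lines, budget):
--         if not lines or budget == 0:
--             return []
--         s = lines[0].strip()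
--         if not s:
--             return go(lines[1:], budget)
--         if s.endswith("?"):
--             return [s]
--         return [s] + go(lines[1:], budget - 1)
--     return " ".join(go(message.split("\n"), 3)).replace("?", ".").strip()
-- ===== Notes on version B (the rewrite author's own statement) =====
-- stated objective: alternative
-- what changed: Replaces A's two-stage pipeline (strip/filter the lines into a parts list, then an accumulator loop with two break conditions) by a single fused budget-carrying recursion over the raw split lines that strips, skips blanks and selects in one pass with no intermediate list and no early empty-input return.
import Mathlib
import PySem

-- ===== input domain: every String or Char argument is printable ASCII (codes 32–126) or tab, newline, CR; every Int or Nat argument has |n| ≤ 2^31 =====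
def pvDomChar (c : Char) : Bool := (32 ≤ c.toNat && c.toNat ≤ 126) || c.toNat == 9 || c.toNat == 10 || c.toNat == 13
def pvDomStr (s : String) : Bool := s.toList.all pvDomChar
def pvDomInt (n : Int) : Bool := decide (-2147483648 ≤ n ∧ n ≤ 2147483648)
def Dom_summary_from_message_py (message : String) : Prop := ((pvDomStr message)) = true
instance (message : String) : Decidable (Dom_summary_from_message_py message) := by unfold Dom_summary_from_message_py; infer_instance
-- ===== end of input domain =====

-- B replaces A's two-stage pipeline (build the stripped/filtered parts list, then an accumulator
-- loop with breaks) by ONE fused budget-carrying recursion over the raw split lines, with no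
-- intermediate list and no early-return for empty input; objective: alternative decomposition.

-- ===== PORT A =====
-- the for-loop over parts, carrying summary_lines
def pvLoopA : List String → List String → List String
  | [], acc => acc
  | p :: rest, acc =>
    let acc' := acc ++ [p]
    if PySem.Str.endswith p "?" then acc'
    else if 3 ≤ acc'.length then acc'
    else pvLoopA rest acc'

def summary_from_message_py (message : String) : String :=
  let parts := (((PySem.Str.split? message "\n").getD []).filter
      (fun part => !(PySem.Str.strip part == ""))).map PySem.Str.strip
  if parts = [] then ""
  else PySem.Str.strip (PySem.Str.replace (PySem.Str.join " " (pvLoopA parts [])) "?" ".")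

-- ===== PORT B =====
-- Source B's inner 'go': fused strip/filter/select recursion on the raw lines with a budget
def pvGoB : List String → Nat → List String
  | _, 0 => []
  | [], _ => []
  | l :: rest, b + 1 =>
    let s := PySem.Str.strip l
    if s == "" then pvGoB rest (b + 1)
    else if PySem.Str.endswith s "?" then [s]
    else s :: pvGoB rest b

def summary_from_message_py_alt (message : String) : String :=
  PySem.Str.strip (PySem.Str.replace
    (PySem.Str.join " " (pvGoB ((PySem.Str.split? message "\n").getD []) 3)) "?" ".")

-- ===== PRECONDITION & SPEC =====
def Spec_summary_from_message_py (message : String) (out : String) : Prop := out = summary_from_message_py_alt message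
instance (message : String) (out : String) : Decidable (Spec_summary_from_message_py message out) := by unfold Spec_summary_from_message_py; infer_instance

-- ===== CLAIM (what is proved, stated in full; the proofs are below) =====
def Claim_equal_summary_from_message_py : Prop := ∀ (message : String), Dom_summary_from_message_py message → Spec_summary_from_message_py message (summary_from_message_py message)

-- ===== LEMMAS AND PROOFS =====
-- inclusive take-until-'?' with a budget, on the already processed parts list
def pvSel : List String → Nat → List String
  | _, 0 => []
  | [], _ => []
  | p :: rest, b + 1 => if PySem.Str.endswith p "?" then [p] else p :: pvSel rest b

theorem pvSel_zero (xs : List String) : pvSel xs 0 = [] := by cases xs <;> rfl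

theorem pvGoB_eq_sel (lines : List String) (b : Nat) :
    pvGoB lines b =
      pvSel ((lines.filter (fun p => !(PySem.Str.strip p == ""))).map PySem.Str.strip) b := by
  induction lines generalizing b with
  | nil => cases b <;> rfl
  | cons l rest ih =>
    cases b with
    | zero => simp [pvGoB, pvSel_zero]
    | succ b =>
      by_cases h : PySem.Str.strip l == ""
      · simp [pvGoB, h, ih]
      · simp only [pvGoB, h, List.filter_cons]
        simp only [Bool.not_false, if_true, List.map_cons, pvSel]
        split_ifs <;> simp_all

theorem pvLoop_eq_sel (parts : List String) : pvLoopA parts [] = pvSel parts 3 := by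
  match parts with
  | [] => rfl
  | [p1] =>
    simp only [pvLoopA, pvSel]
    split_ifs <;> simp_all
  | [p1, p2] =>
    simp only [pvLoopA, pvSel]
    split_ifs <;> simp_all
  | p1 :: p2 :: p3 :: rest =>
    simp only [pvLoopA, pvSel]
    split_ifs <;> simp_all

-- ===== VERDICT (by name: the statement is the Claim_ definition above) =====
theorem summary_from_message_py_spec : Claim_equal_summary_from_message_py := by
  intro message _
  unfold Spec_summary_from_message_py summary_from_message_py summary_from_message_py_alt
  rw [pvGoB_eq_sel]
  set parts := (((PySem.Str.split? message "\n").getD []).filter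
      (fun part => !(PySem.Str.strip part == ""))).map PySem.Str.strip with hp
  by_cases h : parts = []
  · simp [h]
    rfl
  · simp [h, pvLoop_eq_sel]
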